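-- pv_equiv track=rewrite | github.com/ArthurWish/m6a_Project | scripts/dataset/directRMDB.py | genomic_to_transcript_pos
-- ===== SOURCE A (Python) =====
-- from typing import Optional
--
-- def _strip_chr(s: str) -> str:
--     return s[3:] if s.startswith("chr") else s
--
-- def genomic_to_transcript_pos(
--     chrom: str,
--     gpos: int,
--     exons: list[tuple[str, int, int, str]],
-- ) -> Optional[int]:
--     """
--     Convert a 1-based genomic position to a 0-based cDNA position.
--
--     Walks through exons in transcription order (5'→3'), accumulating
--     an offset.  Returns None if the position does not fall in any exon.
--     """
--     if not exons:
--         return None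
--
--     strand  = exons[0][3]
--     chrom_n = _strip_chr(chrom)
--
--     relevant = [(s, e) for (c, s, e, _) in exons if _strip_chr(c) == chrom_n]
--     if not relevant:
--         return None
--
--     if strand == "+":
--         offset = 0
--         for s, e in relevant:
--             if s <= gpos <= e:
--                 return offset + (gpos - s)
--             offset += (e - s + 1)
--     else:
--         offset = 0
--         for s, e in reversed(relevant):
--             if s <= gpos <= e:
--                 return offset + (e - gpos)
--             offset += (e - s + 1)
--
--     return None
-- ===== SOURCE B (Python) =====
-- from typing import Optional
--
-- def genomic_to_transcript_pos(
--     chrom: str,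
--     gpos: int,
--     exons: list[tuple[str, int, int, str]],
-- ) -> Optional[int]:
--     if not exons:
--         return None
--
--     strand = exons[0][3]
--     key = chrom[3:] if chrom.startswith("chr") else chrom
--
--     relevant = [(s, e) for (c, s, e, _) in exons
--                 if (c[3:] if c.startswith("chr") else c) == key]
--     if not relevant:
--         return None
--
--     # ONE forward pass, never reversing the list: record the transcript length
--     # and the first and last plus-strand coordinates of exons containing gpos.
--     total = 0
--     first = last = None
--     for s, e in relevant:
--         if s <= gpos <= e:
--             p = total + (gpos - s)
--             if first is None:
--                 first = p
--             last = p
--         total += e - s + 1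
--     if last is None:
--         return None
--     # The minus-strand position is the arithmetic complement of the last
--     # plus-strand hit: reversing the exon walk equals total - 1 - p.
--     return first if strand == "+" else total - 1 - last
-- ===== Notes on version B (the rewrite author's own statement) =====
-- stated objective: alternative
-- what changed: B never reverses the exon list or branches into strand-specific loops: one forward pass records total transcript length and the first/last plus-strand hit coordinates, and the minus-strand answer is derived by the arithmetic identity total - 1 - last_plus_position.
import Mathlib
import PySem

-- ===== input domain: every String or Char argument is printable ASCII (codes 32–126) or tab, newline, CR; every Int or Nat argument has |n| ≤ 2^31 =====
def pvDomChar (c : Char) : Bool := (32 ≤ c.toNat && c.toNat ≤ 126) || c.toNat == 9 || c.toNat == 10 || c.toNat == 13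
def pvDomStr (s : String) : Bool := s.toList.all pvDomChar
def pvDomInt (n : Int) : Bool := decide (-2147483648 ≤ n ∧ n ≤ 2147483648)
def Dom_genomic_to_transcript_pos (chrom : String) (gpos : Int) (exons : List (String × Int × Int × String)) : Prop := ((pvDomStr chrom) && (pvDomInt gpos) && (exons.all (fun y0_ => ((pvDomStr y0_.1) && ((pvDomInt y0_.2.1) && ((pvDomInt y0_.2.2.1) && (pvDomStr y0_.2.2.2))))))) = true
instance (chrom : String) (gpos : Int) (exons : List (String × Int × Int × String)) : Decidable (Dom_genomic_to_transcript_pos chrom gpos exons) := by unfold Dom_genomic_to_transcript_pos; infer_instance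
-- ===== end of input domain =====

-- B replaces A's two strand-oriented offset loops by one forward pass plus the identity minus-pos = total - 1 - last-plus-pos; same O(n) cost.


-- ===== PORT A =====
-- exact on the ASCII domain: Str.startswith / Str.slice match Python's startswith and s[3:]
def stripChr (s : String) : String :=
  if PySem.Str.startswith s "chr" then PySem.Str.slice s (some 3) none else s

-- A's '+'-strand loop: scan carrying the running offset
def aLoopPlus (gpos : Int) (offset : Int) : List (Int × Int) → Option Int
  | [] => none
  | (s, e) :: rest =>
    if s ≤ gpos ∧ gpos ≤ e then some (offset + (gpos - s))
    else aLoopPlus gpos (offset + (e - s + 1)) rest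

-- A's '-'-strand loop (the caller passes the reversed list)
def aLoopMinus (gpos : Int) (offset : Int) : List (Int × Int) → Option Int
  | [] => none
  | (s, e) :: rest =>
    if s ≤ gpos ∧ gpos ≤ e then some (offset + (e - gpos))
    else aLoopMinus gpos (offset + (e - s + 1)) rest

def genomic_to_transcript_pos (chrom : String) (gpos : Int) (exons : List (String × Int × Int × String)) : Option Int :=
  match exons with
  | [] => none
  | (_, _, _, strand) :: _ =>
    let chromN := stripChr chrom
    let relevant := (exons.filter (fun t => stripChr t.1 == chromN)).map (fun t => (t.2.1, t.2.2.1))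
    if relevant.isEmpty then none
    else if strand == "+" then aLoopPlus gpos 0 relevant
    else aLoopMinus gpos 0 relevant.reverse

-- ===== PORT B =====
-- B's single forward pass: running total, first and last plus-strand hit coordinates
def bScan (gpos : Int) (total : Int) (first last : Option Int) :
    List (Int × Int) → Int × Option Int × Option Int
  | [] => (total, first, last)
  | (s, e) :: rest =>
    if s ≤ gpos ∧ gpos ≤ e then
      let p := total + (gpos - s)
      bScan gpos (total + (e - s + 1)) (some (first.getD p)) (some p) rest
    else bScan gpos (total + (e - s + 1)) first last rest

def genomic_to_transcript_pos_alt (chrom : String) (gpos : Int) (exons : List (String × Int × Int × String)) : Option Int :=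
  match exons with
  | [] => none
  | (_, _, _, strand) :: _ =>
    let key := stripChr chrom
    let relevant := (exons.filter (fun t => stripChr t.1 == key)).map (fun t => (t.2.1, t.2.2.1))
    if relevant.isEmpty then none
    else
      match bScan gpos 0 none none relevant with
      | (tot, first, last) =>
        match last with
        | none => none
        | some lp => if strand == "+" then first else some (tot - 1 - lp)

-- ===== PRECONDITION & SPEC =====
def Spec_genomic_to_transcript_pos (chrom : String) (gpos : Int) (exons : List (String × Int × Int × String)) (out : Option Int) : Prop := out = genomic_to_transcript_pos_alt chrom gpos exons
instance (chrom : String) (gpos : Int) (exons : List (String × Int × Int × String)) (out : Option Int) : Decidable (Spec_genomic_to_transcript_pos chrom gpos exons out) := by unfold Spec_genomic_to_transcript_pos; infer_instance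

-- ===== CLAIM (what is proved, stated in full; the proofs are below) =====
def Claim_equal_genomic_to_transcript_pos : Prop := ∀ (chrom : String) (gpos : Int) (exons : List (String × Int × Int × String)), Dom_genomic_to_transcript_pos chrom gpos exons → Spec_genomic_to_transcript_pos chrom gpos exons (genomic_to_transcript_pos chrom gpos exons)

-- ===== LEMMAS AND PROOFS =====
-- total exon length
def totLen : List (Int × Int) → Int
  | [] => 0
  | (s, e) :: rest => (e - s + 1) + totLen rest

-- last plus-strand hit coordinate with base offset t
def lastP (gpos : Int) (t : Int) : List (Int × Int) → Option Int
  | [] => none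
  | (s, e) :: rest =>
    if s ≤ gpos ∧ gpos ≤ e then (lastP gpos (t + (e - s + 1)) rest).or (some (t + (gpos - s)))
    else lastP gpos (t + (e - s + 1)) rest

theorem bScan_eq (gpos : Int) :
    ∀ (l : List (Int × Int)) (t : Int) (f0 l0 : Option Int),
      bScan gpos t f0 l0 l = (t + totLen l, f0.or (aLoopPlus gpos t l), (lastP gpos t l).or l0) := by
  intro l
  induction l with
  | nil => intro t f0 l0; simp [bScan, totLen, aLoopPlus, lastP]
  | cons hd tl ih =>
    intro t f0 l0
    obtain ⟨s, e⟩ := hd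
    by_cases h : s ≤ gpos ∧ gpos ≤ e
    · simp only [bScan, aLoopPlus, lastP, totLen, if_pos h, ih, Prod.mk.injEq]
      refine ⟨by ring, ?_, ?_⟩
      · cases f0 <;> simp [Option.or]
      · cases lastP gpos (t + (e - s + 1)) tl <;> simp [Option.or]
    · simp only [bScan, aLoopPlus, lastP, totLen, if_neg h, ih]
      have harith : t + (e - s + 1) + totLen tl = t + (e - s + 1 + totLen tl) := by ring
      rw [harith]

theorem totLen_append : ∀ (l1 l2 : List (Int × Int)), totLen (l1 ++ l2) = totLen l1 + totLen l2 := by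
  intro l1 l2
  induction l1 with
  | nil => simp [totLen]
  | cons hd tl ih => obtain ⟨s, e⟩ := hd; simp only [List.cons_append, totLen, ih]; ring

theorem totLen_reverse (l : List (Int × Int)) : totLen l.reverse = totLen l := by
  induction l with
  | nil => rfl
  | cons hd tl ih =>
    obtain ⟨s, e⟩ := hd
    rw [List.reverse_cons, totLen_append, ih]
    simp [totLen]; ring

theorem aLoopMinus_append (gpos : Int) :
    ∀ (l1 l2 : List (Int × Int)) (off : Int),
      aLoopMinus gpos off (l1 ++ l2) = (aLoopMinus gpos off l1).or (aLoopMinus gpos (off + totLen l1) l2) := by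
  intro l1
  induction l1 with
  | nil => intro l2 off; simp [aLoopMinus, totLen]
  | cons hd tl ih =>
    intro l2 off
    obtain ⟨s, e⟩ := hd
    by_cases h : s ≤ gpos ∧ gpos ≤ e
    · simp [aLoopMinus, if_pos h, Option.or]
    · simp only [List.cons_append, aLoopMinus, if_neg h, ih, totLen]
      ring_nf

theorem minus_eq_lastP (gpos : Int) :
    ∀ (l : List (Int × Int)) (off t : Int),
      aLoopMinus gpos off l.reverse = (lastP gpos t l).map (fun p => off + t + totLen l - 1 - p) := by
  intro l
  induction l with
  | nil => intro off t; simp [aLoopMinus, lastP]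
  | cons hd tl ih =>
    intro off t
    obtain ⟨s, e⟩ := hd
    rw [List.reverse_cons, aLoopMinus_append gpos]
    by_cases h : s ≤ gpos ∧ gpos ≤ e
    · simp only [lastP, if_pos h, ih off (t + (e - s + 1)), aLoopMinus, totLen]
      cases lastP gpos (t + (e - s + 1)) tl with
      | none => simp [Option.or]; rw [totLen_reverse]; ring
      | some p => simp [Option.or]; ring
    · simp only [lastP, if_neg h, ih off (t + (e - s + 1)), aLoopMinus, totLen]
      cases lastP gpos (t + (e - s + 1)) tl with
      | none => simp [Option.or]
      | some p => simp [Option.or]; ring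

theorem lastP_none_iff (gpos : Int) :
    ∀ (l : List (Int × Int)) (t : Int),
      lastP gpos t l = none ↔ aLoopPlus gpos t l = none := by
  intro l
  induction l with
  | nil => intro t; simp [lastP, aLoopPlus]
  | cons hd tl ih =>
    intro t
    obtain ⟨s, e⟩ := hd
    by_cases h : s ≤ gpos ∧ gpos ≤ e
    · simp only [lastP, aLoopPlus, if_pos h]
      cases lastP gpos (t + (e - s + 1)) tl <;> simp [Option.or]
    · simp only [lastP, aLoopPlus, if_neg h]
      exact ih _

-- ===== VERDICT (by name: the statement is the Claim_ definition above) =====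
theorem genomic_to_transcript_pos_spec : Claim_equal_genomic_to_transcript_pos := by
  intro chrom gpos exons _
  unfold Spec_genomic_to_transcript_pos genomic_to_transcript_pos genomic_to_transcript_pos_alt
  cases exons with
  | nil => rfl
  | cons hd tl =>
    obtain ⟨c, s, e, strand⟩ := hd
    dsimp only
    split
    · rfl
    · rw [bScan_eq gpos _ 0 none none]
      set rel := (((c, s, e, strand) :: tl).filter (fun t => stripChr t.1 == stripChr chrom)).map
        (fun t => (t.2.1, t.2.2.1)) with hrel
      by_cases hp : (strand == "+") = true
      · simp only [hp, if_true]
        cases hl : lastP gpos 0 rel with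
        | none =>
          have := (lastP_none_iff gpos rel 0).mp hl
          simp [this]
        | some lp => simp [Option.or]
      · simp only [hp]
        rw [minus_eq_lastP gpos rel 0 0]
        cases hl : lastP gpos 0 rel with
        | none => simp
        | some lp => simp [Option.or]
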